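-- pv_equiv track=rewrite | github.com/Rosemberg-Diaz/dikkat | Restaurantes/views.py | generar_indices
-- ===== SOURCE A (Python) =====
-- def generar_indices(num_especiales):
--     """
--     Genera listas de índices e ids para los platos especiales.
--
--     Args:
--         num_especiales: Número de platos especiales.
--
--     Returns:
--         tuple: Dos listas, una de ids y otra de índices.
--     """
--     tipoFront = 1
--     ids = []
--     idx = list(range(num_especiales))
--
--     for _ in idx:
--         ids.append(tipoFront)
--         tipoFront = 1 if tipoFront == 3 else tipoFront + 1
--
--     return ids, idx
-- ===== SOURCE B (Python) =====
-- def generar_indices(num_especiales):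
--     idx = list(range(num_especiales))
--     ids = [(i % 3) + 1 for i in idx]
--     return ids, idx
-- ===== Notes on version B (the rewrite author's own statement) =====
-- stated objective: simpler
-- what changed: Replaces the threaded self-resetting tipoFront accumulator with a stateless closed-form (i % 3) + 1 per position over the index list.
import Mathlib
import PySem

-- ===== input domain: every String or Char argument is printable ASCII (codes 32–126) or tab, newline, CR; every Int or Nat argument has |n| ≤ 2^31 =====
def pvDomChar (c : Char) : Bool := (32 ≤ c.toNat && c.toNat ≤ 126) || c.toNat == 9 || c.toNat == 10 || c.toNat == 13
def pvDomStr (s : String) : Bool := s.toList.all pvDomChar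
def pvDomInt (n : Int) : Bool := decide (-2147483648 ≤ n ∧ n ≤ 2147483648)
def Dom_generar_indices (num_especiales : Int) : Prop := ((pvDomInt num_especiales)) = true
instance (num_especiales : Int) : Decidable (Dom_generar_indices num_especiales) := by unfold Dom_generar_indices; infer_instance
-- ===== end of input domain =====

-- B replaces A's threaded self-resetting tipoFront state with a stateless closed form (i % 3) + 1 per index (objective: simpler).

-- ===== PORT A =====
-- for _ in idx: ids.append(tipoFront); tipoFront = 1 if tipoFront == 3 else tipoFront + 1
def generar_indices (num_especiales : Int) : List Int × List Int :=
  let tipoFront : Int := 1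
  let ids : List Int := []
  let idx : List Int := PySem.List.pyRange 0 num_especiales 1
  let st := idx.foldl (fun (s : List Int × Int) _ =>
      (s.1 ++ [s.2], if s.2 == 3 then 1 else s.2 + 1)) (ids, tipoFront)
  (st.1, idx)

-- ===== PORT B =====
def generar_indices_alt (num_especiales : Int) : List Int × List Int :=
  let idx : List Int := PySem.List.pyRange 0 num_especiales 1
  let ids : List Int := idx.map (fun i => PySem.Int.mod i 3 + 1)
  (ids, idx)

-- ===== PRECONDITION & SPEC =====
def Spec_generar_indices (num_especiales : Int) (out : List Int × List Int) : Prop := out = generar_indices_alt num_especiales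
instance (num_especiales : Int) (out : List Int × List Int) : Decidable (Spec_generar_indices num_especiales out) := by unfold Spec_generar_indices; infer_instance

-- ===== CLAIM (what is proved, stated in full; the proofs are below) =====
def Claim_equal_generar_indices : Prop := ∀ (num_especiales : Int), Dom_generar_indices num_especiales → Spec_generar_indices num_especiales (generar_indices num_especiales)

-- ===== LEMMAS AND PROOFS =====

-- the sequence of values of tipoFront produced by A's loop, starting at t, for n steps
def pvSeq (t : Int) : Nat → List Int
  | 0 => []
  | n + 1 => t :: pvSeq (if t == 3 then 1 else t + 1) n

theorem pvFold_eq_seq (l : List Int) : ∀ (acc : List Int) (t : Int),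
    (l.foldl (fun (s : List Int × Int) _ =>
      (s.1 ++ [s.2], if s.2 == 3 then 1 else s.2 + 1)) (acc, t)).1
    = acc ++ pvSeq t l.length := by
  induction l with
  | nil => intro acc t; simp [pvSeq]
  | cons x xs ih =>
      intro acc t
      simp only [List.foldl_cons, List.length_cons, pvSeq, ih]
      simp

theorem pvSeq_mod (n : Nat) : ∀ (k : Int), 0 ≤ k →
    pvSeq (k % 3 + 1) n = (List.range n).map (fun i : Nat => ((k + (i : Int)) % 3 + 1 : Int)) := by
  induction n with
  | zero => intro k _; simp [pvSeq]
  | succ n ih =>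
      intro k hk
      have h0 : 0 ≤ k % 3 := Int.emod_nonneg k (by norm_num)
      have h3 : k % 3 < 3 := Int.emod_lt_of_pos k (by norm_num)
      have hstep : (if (k % 3 + 1 : Int) == 3 then (1 : Int) else k % 3 + 1 + 1)
          = (k + 1) % 3 + 1 := by
        have h1 : (k + 1) % 3 = (k % 3 + 1) % 3 := by omega
        by_cases h : k % 3 = 2
        · simp [h, h1]
        · have : (k % 3 + 1 : Int) ≠ 3 := by omega
          simp only [beq_iff_eq, this, if_false]
          omega
      rw [List.range_succ_eq_map]
      simp only [pvSeq, hstep, List.map_cons, List.map_map]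
      refine congrArg₂ _ (by simp) ?_
      rw [ih (k + 1) (by omega)]
      apply List.map_congr_left
      intro i _
      simp only [Function.comp, Nat.succ_eq_add_one]
      push_cast
      ring_nf

theorem pvSeq_one (m : Nat) :
    pvSeq 1 m = (List.range m).map (fun i : Nat => ((i : Int) % 3 + 1 : Int)) := by
  have := pvSeq_mod m 0 le_rfl
  simpa using this

theorem generar_indices_spec : Claim_equal_generar_indices := by
  unfold Claim_equal_generar_indices Spec_generar_indices generar_indices generar_indices_alt
  intro n _
  simp only [PySem.List.pyRange_one, Int.sub_zero]
  refine Prod.ext ?_ rfl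
  rw [pvFold_eq_seq]
  simp only [List.length_map, List.length_range, List.nil_append, pvSeq_one, List.map_map]
  apply List.map_congr_left
  intro i _
  simp only [Function.comp]
  rw [PySem.Int.mod_eq_emod_of_pos (by norm_num)]
  simp
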